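-- pv_equiv track=rewrite | github.com/PatYoung/Python | poker_comb/1.py | counts_normal_bomb
-- ===== SOURCE A (Python) =====
-- def counts_normal_bomb(a):
--     bomb = 0
--     bomb_i = 0
--     for i in range(1,14):
--         bomb_i = 0
--         bomb_i = a.count(i)
--         if bomb_i == 4:
--             bomb = bomb + 1
--     return bomb
-- ===== SOURCE B (Python) =====
-- def counts_normal_bomb(a):
--     freq = {}
--     for x in a:
--         freq[x] = freq.get(x, 0) + 1
--     return sum(1 for k, v in freq.items() if v == 4 and 1 <= k <= 13)
-- ===== Notes on version B (the rewrite author's own statement) =====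
-- stated objective: idiomatic
-- what changed: Replaces the thirteen separate a.count(i) scans over the fixed range 1..13 with a single frequency-dict build followed by one pass over the distinct present values, counting keys in 1..13 whose count is exactly 4 (same asymptotics in practice; not measurably faster since list.count runs in C).
import Mathlib
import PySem

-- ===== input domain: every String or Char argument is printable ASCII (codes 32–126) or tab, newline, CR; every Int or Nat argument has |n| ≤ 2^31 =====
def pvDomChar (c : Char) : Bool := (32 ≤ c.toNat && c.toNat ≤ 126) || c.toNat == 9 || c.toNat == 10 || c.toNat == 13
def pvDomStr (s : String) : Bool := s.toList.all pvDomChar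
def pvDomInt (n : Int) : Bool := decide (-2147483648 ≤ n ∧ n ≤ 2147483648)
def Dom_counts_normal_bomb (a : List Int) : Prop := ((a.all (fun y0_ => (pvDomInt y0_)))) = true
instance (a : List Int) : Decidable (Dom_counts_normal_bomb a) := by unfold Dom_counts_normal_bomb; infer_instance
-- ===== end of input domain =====

-- B replaces the 13 full scans of A (one a.count per rank) with one frequency-dict build and one pass over its items.

-- ===== PORT A =====
-- state = (bomb, bomb_i); the 'bomb_i = 0' reset is immediately overwritten, as in A
def counts_normal_bomb (a : List Int) : Int :=
  ((PySem.List.pyRange 1 14 1).foldl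
    (fun (s : Int × Int) i =>
      (if ((a.count i : Nat) : Int) = 4 then s.1 + 1 else s.1, ((a.count i : Nat) : Int)))
    (0, 0)).1

-- ===== PORT B =====
def counts_normal_bomb_alt (a : List Int) : Int :=
  let freq := a.foldl (fun d x => d.insert x (d.getD x 0 + 1)) (PySem.Dict.empty : PySem.Dict Int Int)
  freq.items.foldl (fun acc p => if p.2 = 4 ∧ 1 ≤ p.1 ∧ p.1 ≤ 13 then acc + 1 else acc) 0

-- ===== PRECONDITION & SPEC =====
def Spec_counts_normal_bomb (a : List Int) (out : Int) : Prop := out = counts_normal_bomb_alt a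
instance (a : List Int) (out : Int) : Decidable (Spec_counts_normal_bomb a out) := by unfold Spec_counts_normal_bomb; infer_instance

-- ===== CLAIM (what is proved, stated in full; the proofs are below) =====
def Claim_equal_counts_normal_bomb : Prop := ∀ (a : List Int), Dom_counts_normal_bomb a → Spec_counts_normal_bomb a (counts_normal_bomb a)

-- ===== LEMMAS AND PROOFS =====

lemma countA (a : List Int) :
    counts_normal_bomb a =
      (((PySem.List.pyRange 1 14 1).countP (fun i => decide ((a.count i : Int) = 4))) : Int) := by
  unfold counts_normal_bomb
  rw [PySem.List.foldl_prod_mk (f := fun b i => if ((a.count i : Nat) : Int) = 4 then b + 1 else b)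
      (g := fun _ i => ((a.count i : Nat) : Int))]
  simp [PySem.List.foldl_ite_add_one]

lemma countB (a : List Int) :
    counts_normal_bomb_alt a =
      (((PySem.Set.ofList a).countP (fun k => decide ((a.count k : Int) = 4 ∧ 1 ≤ k ∧ k ≤ 13))) : Int) := by
  unfold counts_normal_bomb_alt
  rw [PySem.Dict.foldl_insert_getD_add_one_eq_counter, PySem.List.foldl_ite_add_one]
  simp [PySem.Dict.items_counter, List.countP_map, Function.comp_def]

theorem pv_main (a : List Int) : counts_normal_bomb a = counts_normal_bomb_alt a := by
  rw [countA, countB]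
  congr 1
  rw [List.countP_eq_length_filter, List.countP_eq_length_filter]
  apply List.Perm.length_eq
  apply (List.perm_ext_iff_of_nodup _ _).2
  · intro k
    simp only [List.mem_filter, PySem.List.mem_pyRange_one, PySem.Set.mem_ofList,
      decide_eq_true_eq]
    constructor
    · rintro ⟨⟨h1, h2⟩, hc⟩
      refine ⟨?_, hc, by omega, by omega⟩
      have : 0 < a.count k := by omega
      exact List.count_pos_iff.mp this
    · rintro ⟨_, hc, h1, h2⟩
      exact ⟨⟨by omega, by omega⟩, hc⟩
  · exact List.Nodup.filter _ (by decide)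
  · exact List.Nodup.filter _ (PySem.Set.nodup_ofList a)

-- ===== VERDICT (by name: the statement is the Claim_ definition above) =====
theorem counts_normal_bomb_spec : Claim_equal_counts_normal_bomb := by
  intro a _
  exact pv_main a
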